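-- pv_equiv track=rewrite | github.com/sunbrother99/LLMPreTrainDocs | code/wordpiece_demo.py | apply_wordpiece
-- ===== SOURCE A (Python) =====
-- def apply_wordpiece(word, vocab):
--     """
--     对单个单词应用 WordPiece 分词
--     :param word: 输入单词
--     :param vocab: 训练好的词汇表
--     :return: 分词后的子词列表（带 ## 前缀）
--     """
--     if not word:
--         return []
--
--     # 步骤 1：初始化为字符序列
--     chars = list(word)
--     tokens = []
--
--     # 步骤 2：贪心最长匹配
--     i = 0
--     while i < len(chars):
--         # 尝试匹配最长的子词
--         longest_match = None
--         for j in range(len(chars), i, -1):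
--             candidate = ''.join(chars[i:j])
--             if candidate in vocab:
--                 longest_match = candidate
--                 break
--
--         if longest_match:
--             # 如果是第一个子词，不加 ##，否则加 ## 前缀
--             if i == 0:
--                 tokens.append(longest_match)
--             else:
--                 tokens.append('##' + longest_match)
--             i += len(longest_match)
--         else:
--             # 如果没有匹配，添加单个字符并移动
--             if i == 0:
--                 tokens.append(chars[i])
--             else:
--                 tokens.append('##' + chars[i])
--             i += 1
--
--     return tokens
-- ===== SOURCE B (Python) =====
-- def apply_wordpiece(word, vocab):
--     vocab_set = set(vocab)
--     max_len = 0
--     for v in vocab: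
--         max_len = max(max_len, len(v))
--     tokens = []
--     i, n = 0, len(word)
--     while i < n:
--         end = i + 1
--         for j in range(i + 1, min(n, i + max_len) + 1):
--             if word[i:j] in vocab_set:
--                 end = j
--         piece = word[i:end]
--         tokens.append(piece if i == 0 else '##' + piece)
--         i = end
--     return tokens
-- ===== Notes on version B (the rewrite author's own statement) =====
-- stated objective: faster
-- what changed: A scans candidate ends backwards from the word end, rebuilding each candidate with join and breaking on the first hit found by a linear scan of the vocab list; B builds a set from vocab once, bounds candidate length by the longest vocab token, and makes a single forward pass per start recording the last end whose slice is in the set.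
import Mathlib
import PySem

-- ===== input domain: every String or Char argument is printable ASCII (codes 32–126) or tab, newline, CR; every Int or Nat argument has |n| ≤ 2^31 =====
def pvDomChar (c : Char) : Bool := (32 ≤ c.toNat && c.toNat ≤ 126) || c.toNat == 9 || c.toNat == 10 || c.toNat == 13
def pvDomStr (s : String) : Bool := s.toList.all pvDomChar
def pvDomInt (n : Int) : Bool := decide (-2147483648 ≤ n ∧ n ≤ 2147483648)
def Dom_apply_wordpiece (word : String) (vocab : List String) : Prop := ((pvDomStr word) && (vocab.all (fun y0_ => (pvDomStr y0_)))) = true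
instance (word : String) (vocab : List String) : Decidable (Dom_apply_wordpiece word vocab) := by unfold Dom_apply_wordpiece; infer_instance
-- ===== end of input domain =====

-- B replaces A's backward break-on-first-match scan (rebuilding each candidate with join and
-- scanning the vocab list for it) with one forward pass per start, bounded by the longest vocab
-- token, recording the last end whose slice lies in a set built once from vocab; same return value.

-- ===== PORT A =====
-- inner loop `for j in range(len(chars), i, -1): candidate = ''.join(chars[i:j]); if candidate in vocab: break`
-- ''.join(chars[i:j]) for Nat i ≤ j is exactly the chars drop i, take (j-i) (the only way A calls it)
def findDesc (chars : List Char) (vocab : List String) (i j : Nat) : Option String :=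
  if _h : j ≤ i then none
  else
    let candidate := String.ofList ((chars.drop i).take (j - i))
    if vocab.contains candidate then some candidate
    else findDesc chars vocab i (j - 1)
termination_by j
decreasing_by omega

-- needed by loopA's termination: a match found by the inner loop is a nonempty token
lemma findDesc_len (chars : List Char) (vocab : List String) (i : Nat) :
    ∀ j m, i < chars.length → j ≤ chars.length →
      findDesc chars vocab i j = some m → 1 ≤ m.length := by
  intro j
  induction j with
  | zero =>
    intro m hi _ h
    rw [findDesc] at h
    simp at h
  | succ j ih =>
    intro m hi hj h
    rw [findDesc] at h
    split at h
    · simp at h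
    · rename_i hgt
      simp only at h
      split at h
      · cases h
        simp only [String.length_ofList, List.length_take, List.length_drop]
        omega
      · exact ih m hi (by omega) (by simpa using h)

-- the `while i < len(chars)` loop of A
def loopA (chars : List Char) (vocab : List String) (i : Nat) (tokens : List String) : List String :=
  if h : i < chars.length then
    match hm : findDesc chars vocab i chars.length with
    | some m =>
        loopA chars vocab (i + m.length)
          (tokens ++ [if i = 0 then m else "##" ++ m])
    | none =>
        loopA chars vocab (i + 1)
          (tokens ++ [if i = 0 then String.ofList [chars[i]] else "##" ++ String.ofList [chars[i]]])
  else tokens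
termination_by chars.length - i
decreasing_by
  · have := findDesc_len chars vocab i chars.length m h (le_refl _) hm
    omega
  · omega

def apply_wordpiece (word : String) (vocab : List String) : List String :=
  if word = "" then [] else loopA word.toList vocab 0 []

-- ===== PORT B =====
-- needed by loopB's termination: the recorded end never moves left of its initial value i+1
lemma foldl_pick_mem (p : Nat → Bool) : ∀ (l : List Nat) (b0 : Nat),
    l.foldl (fun b j => if p j then j else b) b0 = b0 ∨
    l.foldl (fun b j => if p j then j else b) b0 ∈ l := by
  intro l
  induction l with
  | nil => intro b0; left; rfl
  | cons x t ih =>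
    intro b0
    simp only [List.foldl_cons]
    rcases ih (if p x then x else b0) with h | h
    · rw [h]
      split
      · right; simp
      · left; rfl
    · right; simp [h]

lemma pick_ge (p : Nat → Bool) (a k : Nat) :
    a ≤ (List.range' a k).foldl (fun b j => if p j then j else b) a := by
  rcases foldl_pick_mem p (List.range' a k) a with h | h
  · rw [h]
  · rw [List.mem_range'_1] at h
    omega

-- the `while i < n` loop of B; `for j in range(i+1, n+1)` over these Nat bounds is
-- exactly List.range' (i+1) (n-i), and word[i:j] for 0 ≤ i ≤ j is drop i, take (j-i)
def loopB (chars : List Char) (vs : PySem.Set String) (maxLen : Nat) (i n : Nat) (tokens : List String) : List String :=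
  if _h : i < n then
    -- range(i+1, min(n, i+max_len)+1) has exactly min n (i+maxLen) - i elements
    let e := (List.range' (i+1) (min n (i+maxLen) - i)).foldl
      (fun b j => if PySem.Set.contains vs (String.ofList ((chars.drop i).take (j - i))) then j else b) (i+1)
    let piece := String.ofList ((chars.drop i).take (e - i))
    loopB chars vs maxLen e n (tokens ++ [if i = 0 then piece else "##" ++ piece])
  else tokens
termination_by n - i
decreasing_by
  simp only [dite_eq_ite]
  have := pick_ge (fun j => PySem.Set.contains vs (String.ofList ((chars.drop i).take (j - i)))) (i+1) (min n (i+maxLen) - i)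
  omega

def apply_wordpiece_alt (word : String) (vocab : List String) : List String :=
  let vocab_set : PySem.Set String := PySem.Set.ofList vocab
  -- `for v in vocab: max_len = max(max_len, len(v))`; len(v) = number of characters of v
  let max_len := vocab.foldl (fun m v => max m v.toList.length) 0
  -- len(word) = number of characters of word
  loopB word.toList vocab_set max_len 0 word.toList.length []

-- ===== PRECONDITION & SPEC =====
def Spec_apply_wordpiece (word : String) (vocab : List String) (out : List String) : Prop := out = apply_wordpiece_alt word vocab
instance (word : String) (vocab : List String) (out : List String) : Decidable (Spec_apply_wordpiece word vocab out) := by unfold Spec_apply_wordpiece; infer_instance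

-- ===== CLAIM (what is proved, stated in full; the proofs are below) =====
def Claim_equal_apply_wordpiece : Prop := ∀ (word : String) (vocab : List String), Dom_apply_wordpiece word vocab → Spec_apply_wordpiece word vocab (apply_wordpiece word vocab)

-- ===== LEMMAS AND PROOFS =====

lemma contains_ofList (l : List String) (x : String) :
    PySem.Set.contains (PySem.Set.ofList l) x = l.contains x := by
  have := PySem.Set.mem_ofList (y := x) (xs := l)
  simp [PySem.Set.contains, this]

-- B's forward scan result, abbreviated (definitionally the fold inside loopB after contains_ofList)
def bestEnd (chars : List Char) (vocab : List String) (i k : Nat) : Nat :=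
  (List.range' (i+1) k).foldl
    (fun b j => if vocab.contains (String.ofList ((chars.drop i).take (j - i))) then j else b) (i+1)

-- the core: A's descending first match and B's ascending last match agree
lemma bridge (chars : List Char) (vocab : List String) (i : Nat) : ∀ k,
    (∀ m, findDesc chars vocab i (i+k) = some m →
       m = String.ofList ((chars.drop i).take (bestEnd chars vocab i k - i)))
    ∧ (findDesc chars vocab i (i+k) = none → bestEnd chars vocab i k = i+1) := by
  intro k
  induction k with
  | zero =>
    constructor
    · intro m h
      rw [findDesc] at h
      simp at h
    · intro _
      rfl
  | succ k ih =>
    have hrange : List.range' (i+1) (k+1) = List.range' (i+1) k ++ [(i+1)+k] :=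
      List.range'_1_concat
    have hbe : bestEnd chars vocab i (k+1) =
        if vocab.contains (String.ofList ((chars.drop i).take (i+1+k - i)))
        then i+1+k else bestEnd chars vocab i k := by
      rw [bestEnd, hrange, List.foldl_append]
      rfl
    have hfd : findDesc chars vocab i (i+(k+1)) =
        if vocab.contains (String.ofList ((chars.drop i).take (i+(k+1) - i)))
        then some (String.ofList ((chars.drop i).take (i+(k+1) - i)))
        else findDesc chars vocab i (i+k) := by
      have h1 : i+(k+1) - 1 = i + k := by omega
      rw [findDesc]
      have h2 : ¬ (i+(k+1) ≤ i) := by omega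
      simp only [dif_neg h2, h1]
    have harith : i+(k+1) - i = i+1+k - i := by omega
    constructor
    · intro m h
      rw [hfd] at h
      rw [hbe]
      split at h
      · rename_i hc
        cases h
        rw [harith] at hc ⊢
        rw [if_pos hc]
      · rename_i hc
        rw [harith] at hc
        rw [if_neg hc]
        exact ih.1 m h
    · intro h
      rw [hfd] at h
      split at h
      · simp at h
      · rename_i hc
        rw [harith] at hc
        rw [hbe, if_neg hc]
        exact ih.2 h

lemma bestEnd_bounds (chars : List Char) (vocab : List String) (i k : Nat) (hk : 1 ≤ k) :
    i + 1 ≤ bestEnd chars vocab i k ∧ bestEnd chars vocab i k ≤ i + k := by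
  constructor
  · exact pick_ge _ (i+1) k
  · rcases foldl_pick_mem (fun j => vocab.contains (String.ofList ((chars.drop i).take (j - i))))
      (List.range' (i+1) k) (i+1) with h | h
    · rw [bestEnd, h]; omega
    · rw [List.mem_range'_1] at h
      rw [bestEnd]
      omega

lemma foldl_pick_id (p : Nat → Bool) (l : List Nat) (b0 : Nat) (h : ∀ j ∈ l, p j = false) :
    l.foldl (fun b j => if p j then j else b) b0 = b0 := by
  rw [PySem.List.foldl_congr_mem l _ (fun b _ => b) b0 (by intro acc x hx; simp [h x hx])]
  exact PySem.List.foldl_ignore l b0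

-- candidates longer than every vocab token cannot match, so B's bounded forward scan
-- computes the same end as the unbounded one
lemma bestEnd_trunc (chars : List Char) (vocab : List String) (L i : Nat)
    (hL : ∀ v ∈ vocab, v.toList.length ≤ L) (hi : i < chars.length) :
    (List.range' (i+1) (min chars.length (i+L) - i)).foldl
      (fun b j => if vocab.contains (String.ofList ((chars.drop i).take (j - i))) then j else b) (i+1)
    = bestEnd chars vocab i (chars.length - i) := by
  by_cases hc : chars.length ≤ i + L
  · have h1 : min chars.length (i+L) - i = chars.length - i := by omega
    rw [h1]
    rfl
  · have hmin : min chars.length (i+L) - i = L := by omega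
    rw [hmin, bestEnd]
    have hsplit : List.range' (i+1) (chars.length - i) =
        List.range' (i+1) L ++ List.range' (i+1+L) (chars.length - i - L) := by
      rw [List.range'_append_1]
      congr 1
      omega
    rw [hsplit, List.foldl_append]
    refine (foldl_pick_id _ _ _ ?_).symm
    intro j hj
    rw [List.mem_range'_1] at hj
    by_contra hcontains
    simp only [Bool.not_eq_false] at hcontains
    have hmem : String.ofList ((chars.drop i).take (j - i)) ∈ vocab :=
      List.mem_of_elem_eq_true hcontains
    have hlen := hL _ hmem
    rw [String.toList_ofList] at hlen
    simp only [List.length_take, List.length_drop] at hlen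
    omega

lemma loop_eq (chars : List Char) (vocab : List String) :
    ∀ (L : Nat), (∀ v ∈ vocab, v.toList.length ≤ L) →
    ∀ K i tokens, chars.length - i ≤ K →
    loopA chars vocab i tokens = loopB chars (PySem.Set.ofList vocab) L i chars.length tokens := by
  intro L hL K
  induction K with
  | zero =>
    intro i tokens h
    rw [loopA.eq_def, loopB.eq_def]
    have : ¬ i < chars.length := by omega
    simp [this]
  | succ K ih =>
    intro i tokens h
    by_cases hi : i < chars.length
    · rw [loopA.eq_def, loopB.eq_def]
      simp only [dif_pos hi, contains_ofList]
      rw [bestEnd_trunc chars vocab L i hL hi]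
      have hk1 : 1 ≤ chars.length - i := by omega
      have hb := bestEnd_bounds chars vocab i (chars.length - i) hk1
      have harith : i + (chars.length - i) = chars.length := by omega
      have hbr := bridge chars vocab i (chars.length - i)
      rw [harith] at hbr
      set b := bestEnd chars vocab i (chars.length - i) with hbdef
      split
      · rename_i m hm
        have hm' := hbr.1 m hm
        have hlen : m.length = b - i := by
          rw [hm']
          simp only [String.length_ofList, List.length_take, List.length_drop]
          omega
        rw [← hm']
        have hadv : i + m.length = b := by omega
        rw [hadv]
        exact ih b _ (by omega)
      · rename_i hm
        have hb1 := hbr.2 hm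
        have hdrop : chars.drop i = chars[i] :: chars.drop (i+1) := List.drop_eq_getElem_cons hi
        have hpiece : String.ofList ((chars.drop i).take (b - i)) = String.ofList [chars[i]] := by
          rw [hb1, hdrop, show i+1-i = 1 from by omega, List.take_succ_cons, List.take_zero]
        rw [hb1] at hpiece ⊢
        rw [hpiece]
        exact ih (i+1) _ (by omega)
    · rw [loopA.eq_def, loopB.eq_def]
      simp [hi]

-- ===== VERDICT (by name: the statement is the Claim_ definition above) =====
theorem apply_wordpiece_spec : Claim_equal_apply_wordpiece := by
  intro word vocab _
  show apply_wordpiece word vocab = apply_wordpiece_alt word vocab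
  rw [apply_wordpiece, apply_wordpiece_alt]
  split
  · rename_i hw
    subst hw
    rw [loopB.eq_def]
    simp
  · exact loop_eq word.toList vocab _
      (fun v hv => (PySem.List.le_foldl_max_nat vocab (fun v => v.toList.length) 0).2 v hv)
      word.toList.length 0 [] (by omega)
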